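-- pv_equiv track=rewrite | github.com/sdufays/Games-2023 | mines.py | get_all_coordinates
-- ===== SOURCE A (Python) =====
-- def get_all_coordinates(game):
--     dimensions = game["dimensions"]
--     num_dimensions = len(dimensions)
--     coordinates = []
--
--     # generate coordinates
--     def recursive_coordinates(coords, depth):
--         if depth == num_dimensions:
--             coordinates.append(coords)
--             return
--         for i in range(dimensions[depth]):
--             recursive_coordinates(
--                 coords[:depth] + (i,) + coords[depth + 1 :], depth + 1
--             )
--
--     recursive_coordinates((), 0)
--     return coordinates
-- ===== SOURCE B (Python) =====
-- def get_all_coordinates(game):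
--     coords = [()]
--     for d in game["dimensions"]:
--         coords = [t + (i,) for t in coords for i in range(d)]
--     return coords
-- ===== Notes on version B (the rewrite author's own statement) =====
-- stated objective: idiomatic
-- what changed: Replaces the depth-first recursive helper that mutates a closed-over accumulator with an iterative breadth-wise build: start from [()] and extend every partial tuple with each index of the next dimension.
-- outside the precondition, e.g. on get_all_coordinates({}): A raises KeyError, B raises KeyError
import Mathlib
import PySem

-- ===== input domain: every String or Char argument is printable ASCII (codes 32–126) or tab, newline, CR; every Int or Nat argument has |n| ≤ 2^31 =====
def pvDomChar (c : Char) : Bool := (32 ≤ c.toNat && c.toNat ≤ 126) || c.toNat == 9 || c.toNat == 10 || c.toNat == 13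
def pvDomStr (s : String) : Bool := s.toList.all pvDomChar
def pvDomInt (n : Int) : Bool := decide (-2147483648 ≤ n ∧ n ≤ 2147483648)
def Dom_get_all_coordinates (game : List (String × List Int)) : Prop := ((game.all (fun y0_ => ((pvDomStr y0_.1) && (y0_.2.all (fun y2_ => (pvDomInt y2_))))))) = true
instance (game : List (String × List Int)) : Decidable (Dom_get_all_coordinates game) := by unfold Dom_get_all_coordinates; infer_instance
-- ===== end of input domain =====

-- B replaces the depth-first recursive helper with an iterative breadth-wise build (idiomatic).

-- ===== PORT A =====
-- the inner 'recursive_coordinates(coords, depth)': fuel = num_dimensions - depth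
-- (the recursion always starts at depth 0 and stops exactly at depth = num_dimensions,
--  so 'depth == num_dimensions' is exactly 'fuel == 0')
def pvRecA (dims : List Int) (depth : Nat) (coords : List Int) : Nat → List (List Int) → List (List Int)
  | 0, acc => acc ++ [coords]
  | fuel+1, acc =>
      (PySem.List.pyRange 0 ((PySem.List.pyGet? dims (depth : Int)).getD 0) 1).foldl
        (fun a i => pvRecA dims (depth+1)
            (PySem.List.slice coords none (some (depth : Int)) ++ [i] ++
             PySem.List.slice coords (some ((depth : Int) + 1)) none)
            fuel a) acc

def get_all_coordinates (game : List (String × List Int)) : List (List Int) :=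
  match (PySem.Dict.mk game).get? "dimensions" with
  | none => []   -- Python raises KeyError here; excluded by Pre_
  | some dims => pvRecA dims 0 [] dims.length []

-- ===== PORT B =====
def get_all_coordinates_alt (game : List (String × List Int)) : List (List Int) :=
  match (PySem.Dict.mk game).get? "dimensions" with
  | none => []   -- Python raises KeyError here; excluded by Pre_
  | some dims =>
      dims.foldl
        (fun coords d => coords.flatMap (fun t => (PySem.List.pyRange 0 d 1).map (fun i => t ++ [i])))
        [[]]

-- ===== PRECONDITION & SPEC =====
-- A raises KeyError when the "dimensions" key is absent; exactly those inputs are excluded.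
def Pre_get_all_coordinates (game : List (String × List Int)) : Prop :=
  (PySem.Dict.mk game).contains "dimensions" = true
instance (game : List (String × List Int)) : Decidable (Pre_get_all_coordinates game) := by
  unfold Pre_get_all_coordinates; infer_instance
def pvWitness_get_all_coordinates : (List (String × List Int)) := [("dimensions", [2, 3])]

def Spec_get_all_coordinates (game : List (String × List Int)) (out : List (List Int)) : Prop := out = get_all_coordinates_alt game
instance (game : List (String × List Int)) (out : List (List Int)) : Decidable (Spec_get_all_coordinates game out) := by unfold Spec_get_all_coordinates; infer_instance

-- ===== CLAIM (what is proved, stated in full; the proofs are below) =====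
def Claim_equal_get_all_coordinates : Prop := ∀ (game : List (String × List Int)), Dom_get_all_coordinates game → Pre_get_all_coordinates game → Spec_get_all_coordinates game (get_all_coordinates game)

-- ===== LEMMAS AND PROOFS =====

-- B's loop body and loop, named for the proofs
def pvStep (ts : List (List Int)) (d : Int) : List (List Int) :=
  ts.flatMap (fun t => (PySem.List.pyRange 0 d 1).map (fun i => t ++ [i]))

def pvExt (rest : List Int) (ts : List (List Int)) : List (List Int) :=
  rest.foldl pvStep ts

lemma pvExt_dist (rest : List Int) : ∀ ts : List (List Int),
    pvExt rest ts = ts.flatMap (fun t => pvExt rest [t]) := by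
  induction rest with
  | nil => intro ts; simp [pvExt]
  | cons d rest ih =>
    intro ts
    show pvExt rest (pvStep ts d) = ts.flatMap (fun t => pvExt rest (pvStep [t] d))
    rw [ih (pvStep ts d)]
    simp only [pvStep, List.flatMap_assoc, List.flatMap_singleton]
    congr 1
    funext t
    rw [ih ((PySem.List.pyRange 0 d 1).map (fun i => t ++ [i]))]

lemma pvRecA_spec (dims : List Int) : ∀ (rest : List Int) (depth : Nat) (coords : List Int)
    (acc : List (List Int)), coords.length = depth → dims.drop depth = rest →
    pvRecA dims depth coords rest.length acc = acc ++ pvExt rest [coords] := by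
  intro rest
  induction rest with
  | nil => intro depth coords acc _ _; simp [pvRecA, pvExt]
  | cons d rest ih =>
    intro depth coords acc hlen hdrop
    have hget : dims[depth]? = some d := by
      have : (dims.drop depth)[0]? = some d := by rw [hdrop]; rfl
      simpa using this
    have hcoords : ∀ i : Int,
        PySem.List.slice coords none (some (depth : Int)) ++ [i] ++
          PySem.List.slice coords (some ((depth : Int) + 1)) none = coords ++ [i] := by
      intro i
      have h1 : PySem.List.slice coords none (some (depth : Int)) = coords := by
        rw [PySem.List.slice_to_natCast]; simp [hlen]
      have h2 : PySem.List.slice coords (some ((depth : Int) + 1)) none = [] := by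
        have : ((depth : Int) + 1) = ((depth + 1 : Nat) : Int) := by push_cast; ring
        rw [this, PySem.List.slice_from_natCast]
        simp [List.drop_eq_nil_iff, hlen]
      rw [h1, h2]; simp
    have hdrop' : dims.drop (depth + 1) = rest := by
      have := congrArg List.tail hdrop
      simpa [List.tail_drop] using this
    show (PySem.List.pyRange 0 ((PySem.List.pyGet? dims (depth : Int)).getD 0) 1).foldl
        (fun a i => pvRecA dims (depth+1)
            (PySem.List.slice coords none (some (depth : Int)) ++ [i] ++
             PySem.List.slice coords (some ((depth : Int) + 1)) none)
            rest.length a) acc = acc ++ pvExt (d :: rest) [coords]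
    have hbody : ∀ (a : List (List Int)) (i : Int),
        pvRecA dims (depth+1)
            (PySem.List.slice coords none (some (depth : Int)) ++ [i] ++
             PySem.List.slice coords (some ((depth : Int) + 1)) none)
            rest.length a = a ++ pvExt rest [coords ++ [i]] := by
      intro a i
      rw [hcoords i]
      exact ih (depth + 1) (coords ++ [i]) a (by simp [hlen]) hdrop'
    rw [PySem.List.pyGet?_natCast, hget]
    calc (PySem.List.pyRange 0 d 1).foldl
          (fun a i => pvRecA dims (depth+1)
              (PySem.List.slice coords none (some (depth : Int)) ++ [i] ++
               PySem.List.slice coords (some ((depth : Int) + 1)) none)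
              rest.length a) acc
        = (PySem.List.pyRange 0 d 1).foldl (fun a i => a ++ pvExt rest [coords ++ [i]]) acc := by
          exact PySem.List.foldl_congr_mem _ _ _ _ (fun a i _ => hbody a i)
      _ = acc ++ (PySem.List.pyRange 0 d 1).flatMap (fun i => pvExt rest [coords ++ [i]]) :=
          PySem.List.foldl_append_eq_flatMap _ _ _
      _ = acc ++ pvExt (d :: rest) [coords] := by
          show _ = acc ++ pvExt rest (pvStep [coords] d)
          rw [pvExt_dist rest (pvStep [coords] d)]
          simp [pvStep, List.flatMap_map]

theorem get_all_coordinates_spec : Claim_equal_get_all_coordinates := by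
  intro game _ hpre
  unfold Spec_get_all_coordinates get_all_coordinates get_all_coordinates_alt
  cases hget : (PySem.Dict.mk game).get? "dimensions" with
  | none =>
      exfalso
      rw [Pre_get_all_coordinates, PySem.Dict.contains_eq_isSome_get?, hget] at hpre
      exact Bool.noConfusion hpre
  | some dims =>
    simp only
    have := pvRecA_spec dims dims (0 : Nat) [] [] rfl rfl
    rw [this]
    rfl
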